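-- pv_equiv track=rewrite | github.com/sujoysarkarai/mahanama | src/baselines/dual-cache-coref/analysis/analysis_entity_spread_error.py | get_sandhi_mention
-- ===== SOURCE A (Python) =====
-- def get_sandhi_mention(input_list):
--     men_list = []
--     sandhi_mention_list = []
--     for clu, _, _, _, _ in input_list:
--         for men in clu:
--             if men in men_list and men not in sandhi_mention_list:
--                 sandhi_mention_list.append(men)
--             men_list.append(men)
--     return sandhi_mention_list
-- ===== SOURCE B (Python) =====
-- def get_sandhi_mention(input_list):
--     # Two-pass re-implementation: flatten the mentions, index every mention's
--     # occurrence positions in one dict pass, then return the mentions with at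
--     # least two occurrences sorted by the position of their second occurrence
--     # (which is exactly the order A appends them in).
--     flat = [men for clu, _, _, _, _ in input_list for men in clu]
--     positions = {}
--     for i, men in enumerate(flat):
--         positions.setdefault(men, []).append(i)
--     dups = [m for m, p in positions.items() if len(p) >= 2]
--     dups.sort(key=lambda m: positions[m][1])
--     return dups
-- ===== Notes on version B (the rewrite author's own statement) =====
-- stated objective: faster
-- what changed: A detects duplicates on the fly with two growing accumulator lists scanned by 'in'; B flattens the mentions once, records each mention's occurrence positions in a single dict pass, then returns the mentions with at least two occurrences sorted by the index of their second occurrence.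
import Mathlib
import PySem

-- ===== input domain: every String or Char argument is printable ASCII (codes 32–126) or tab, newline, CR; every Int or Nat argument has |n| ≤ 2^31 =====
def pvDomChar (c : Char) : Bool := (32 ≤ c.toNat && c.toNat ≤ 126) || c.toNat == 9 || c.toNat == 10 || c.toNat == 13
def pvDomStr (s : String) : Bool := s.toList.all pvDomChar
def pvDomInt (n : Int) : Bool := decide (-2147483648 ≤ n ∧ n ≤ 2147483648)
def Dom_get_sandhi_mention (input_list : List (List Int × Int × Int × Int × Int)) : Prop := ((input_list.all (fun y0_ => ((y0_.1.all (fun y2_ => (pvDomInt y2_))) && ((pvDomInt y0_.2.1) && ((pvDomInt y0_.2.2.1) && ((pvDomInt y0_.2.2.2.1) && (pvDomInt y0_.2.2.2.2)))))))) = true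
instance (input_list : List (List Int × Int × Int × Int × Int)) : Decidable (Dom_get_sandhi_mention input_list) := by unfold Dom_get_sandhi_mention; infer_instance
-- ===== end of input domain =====

-- B replaces A's on-the-fly duplicate tracking (quadratic list membership) by a two-pass
-- scheme: flatten, index each mention's occurrence positions in one dict pass, then sort the
-- duplicated mentions by the index of their second occurrence.


-- ===== PORT A =====
-- one step of the inner loop body: check-and-append to sandhi_mention_list, then append to men_list
def pvStepA (st : List Int × List Int) (men : Int) : List Int × List Int :=
  (st.1 ++ [men], if men ∈ st.1 ∧ men ∉ st.2 then st.2 ++ [men] else st.2)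

def get_sandhi_mention (input_list : List (List Int × Int × Int × Int × Int)) : List Int :=
  (input_list.foldl (fun st t => t.1.foldl pvStepA st) ([], [])).2

-- ===== PORT B =====
def get_sandhi_mention_alt (input_list : List (List Int × Int × Int × Int × Int)) : List Int :=
  let flat := input_list.flatMap (fun t => t.1)
  -- positions.setdefault(men, []).append(i)  ==  positions[men] = positions.get(men, []) + [i]
  let positions := (PySem.List.enumerate flat 0).foldl
      (fun d p => d.modify p.2 [] (fun v => v ++ [p.1])) PySem.Dict.empty
  let dups := (positions.items.filter (fun q => 2 ≤ q.2.length)).map (fun q => q.1)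
  -- key(m) = positions[m][1]; both lookups are in range for every m the sort sees
  -- (m is a key with ≥ 2 recorded positions), so neither default is ever used there.
  PySem.List.sorted dups (fun m => PySem.List.pyGetD (positions.getD m []) 1 0) false

-- ===== PRECONDITION & SPEC =====
def Spec_get_sandhi_mention (input_list : List (List Int × Int × Int × Int × Int)) (out : List Int) : Prop := out = get_sandhi_mention_alt input_list
instance (input_list : List (List Int × Int × Int × Int × Int)) (out : List Int) : Decidable (Spec_get_sandhi_mention input_list out) := by unfold Spec_get_sandhi_mention; infer_instance

-- ===== CLAIM (what is proved, stated in full; the proofs are below) =====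
def Claim_equal_get_sandhi_mention : Prop := ∀ (input_list : List (List Int × Int × Int × Int × Int)), Dom_get_sandhi_mention input_list → Spec_get_sandhi_mention input_list (get_sandhi_mention input_list)

-- ===== LEMMAS AND PROOFS =====

-- proof-side abbreviations: the occurrence positions of m in flat, and the
-- second-occurrence key B sorts by
def pvOcc (flat : List Int) (m : Int) : List Int :=
  ((PySem.List.enumerate flat 0).filter (fun p => p.2 == m)).map (·.1)

def pvKeyB (flat : List Int) (m : Int) : Int :=
  PySem.List.pyGetD (pvOcc flat m) 1 0


-- the list of mentions A emits, as a recursion over the flattened mention stream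
def pvCollect : List Int → List Int → List Int
  | _, [] => []
  | seen, m :: rest =>
      (if seen.count m = 1 then [m] else []) ++ pvCollect (seen ++ [m]) rest

theorem pvFoldA_eq (rest seen sandhi : List Int)
    (hinv : ∀ m, m ∈ sandhi ↔ 2 ≤ seen.count m) :
    rest.foldl pvStepA (seen, sandhi) = (seen ++ rest, sandhi ++ pvCollect seen rest) := by
  induction rest generalizing seen sandhi with
  | nil => simp [pvCollect]
  | cons m rest ih =>
      have hmem : (m ∈ seen ∧ m ∉ sandhi) ↔ seen.count m = 1 := by
        rw [hinv m, ← List.count_pos_iff]; omega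
      by_cases h : seen.count m = 1
      · have hc : m ∈ seen ∧ m ∉ sandhi := hmem.mpr h
        simp only [List.foldl_cons, pvStepA, if_pos hc]
        rw [ih (seen ++ [m]) (sandhi ++ [m]) ?_]
        · simp [pvCollect, h]
        · intro m'
          have hcm : (seen ++ [m]).count m' = seen.count m' + if m = m' then 1 else 0 := by
            simp [List.count_append, List.count_cons]
          rw [List.mem_append, List.mem_singleton, hinv m', hcm]
          by_cases hm : m = m'
          · subst hm; simp [h]
          · have hm' : ¬ m' = m := fun hh => hm hh.symm
            simp [hm, hm']
      · have hc : ¬ (m ∈ seen ∧ m ∉ sandhi) := fun hx => h (hmem.mp hx)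
        simp only [List.foldl_cons, pvStepA, if_neg hc]
        rw [ih (seen ++ [m]) sandhi ?_]
        · simp [pvCollect, h]
        · intro m'
          have hcm : (seen ++ [m]).count m' = seen.count m' + if m = m' then 1 else 0 := by
            simp [List.count_append, List.count_cons]
          rw [hinv m', hcm]
          by_cases hm : m = m'
          · subst hm; rw [if_pos rfl]; omega
          · rw [if_neg hm]; omega

theorem pvFoldOuter_eq (L : List (List Int × Int × Int × Int × Int))
    (st : List Int × List Int) :
    L.foldl (fun st t => t.1.foldl pvStepA st) st
      = (L.flatMap (fun t => t.1)).foldl pvStepA st := by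
  induction L generalizing st with
  | nil => simp
  | cons t L ih => simp [List.flatMap_cons, List.foldl_append, ih]

theorem mem_pvCollect (rest : List Int) (seen : List Int) (m : Int) :
    m ∈ pvCollect seen rest ↔ seen.count m ≤ 1 ∧ 2 ≤ seen.count m + rest.count m := by
  induction rest generalizing seen with
  | nil =>
      simp only [pvCollect, List.not_mem_nil, List.count_nil, false_iff]
      omega
  | cons x rest ih =>
      by_cases hx : x = m
      · subst hx
        by_cases h : seen.count x = 1 <;>
          simp [pvCollect, h, ih, List.count_append, List.count_cons] <;> omega
      · have hx' : ¬ m = x := fun hh => hx hh.symm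
        by_cases h : seen.count x = 1 <;>
          simp [pvCollect, h, ih, List.count_append, List.count_cons, hx, hx'] <;> omega

theorem nodup_pvCollect (rest : List Int) (seen : List Int) :
    (pvCollect seen rest).Nodup := by
  induction rest generalizing seen with
  | nil => simp [pvCollect]
  | cons x rest ih =>
      by_cases h : seen.count x = 1
      · simp only [pvCollect, h, if_pos, List.singleton_append]
        refine List.nodup_cons.mpr ⟨?_, ih _⟩
        rw [mem_pvCollect]
        simp [List.count_append, h]
      · simpa [pvCollect, h] using ih (seen ++ [x])

-- the filtered enumerate underlying pvKeyB lists the positions of m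
theorem filter_enumerate_count (l : List Int) (m : Int) (s : Int) :
    (((PySem.List.enumerate l s).filter (fun p => p.2 == m)).map (·.1)).length
      = l.count m := by
  induction l generalizing s with
  | nil => simp [PySem.List.enumerate_nil]
  | cons x l ih =>
      by_cases hx : x = m
      · simp [PySem.List.enumerate_cons, hx, List.count_cons, ih]
      · simp [PySem.List.enumerate_cons, hx, List.count_cons, ih]

theorem pvKeyB_eq (pre suf : List Int) (m : Int) (h : pre.count m = 1) :
    pvKeyB (pre ++ m :: suf) m = (pre.length : Int) := by
  unfold pvKeyB pvOcc
  rw [PySem.List.enumerate_append]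
  rw [List.filter_append, List.map_append]
  have hlen : (((PySem.List.enumerate pre 0).filter (fun p => p.2 == m)).map (·.1)).length = 1 := by
    rw [filter_enumerate_count]; exact h
  obtain ⟨a, ha⟩ := List.length_eq_one_iff.mp hlen
  rw [ha]
  simp only [PySem.List.enumerate_cons, List.filter_cons, BEq.rfl, if_pos, List.map_cons]
  simp [PySem.List.pyGetD]

theorem pvKeyB_ge (post : List Int) (pre : List Int) (m : Int)
    (hm : m ∈ pvCollect pre post) :
    (pre.length : Int) ≤ pvKeyB (pre ++ post) m := by
  induction post generalizing pre with
  | nil => simp [pvCollect] at hm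
  | cons x post ih =>
      have hstep : (pre ++ [x]) ++ post = pre ++ x :: post := by simp
      by_cases h : pre.count x = 1
      · rcases (by simpa [pvCollect, h] using hm) with hx | hx
        · subst hx
          rw [pvKeyB_eq pre post m h]
        · have h2 := ih (pre ++ [x]) hx
          rw [hstep] at h2
          simp only [List.length_append, List.length_cons, List.length_nil] at h2
          omega
      · have hx : m ∈ pvCollect (pre ++ [x]) post := by simpa [pvCollect, h] using hm
        have h2 := ih (pre ++ [x]) hx
        rw [hstep] at h2
        simp only [List.length_append, List.length_cons, List.length_nil] at h2
        omega

theorem pairwise_pvCollect (post : List Int) (pre : List Int) :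
    (pvCollect pre post).Pairwise
      (fun a b => pvKeyB (pre ++ post) a < pvKeyB (pre ++ post) b) := by
  induction post generalizing pre with
  | nil => simp [pvCollect]
  | cons x post ih =>
      have hstep : (pre ++ [x]) ++ post = pre ++ x :: post := by simp
      by_cases h : pre.count x = 1
      · simp only [pvCollect, h, if_pos, List.singleton_append]
        refine List.pairwise_cons.mpr ⟨?_, ?_⟩
        · intro b hb
          rw [pvKeyB_eq pre post x h]
          have h2 := pvKeyB_ge post (pre ++ [x]) b hb
          rw [hstep] at h2
          simp only [List.length_append, List.length_cons, List.length_nil] at h2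
          omega
        · have h2 := ih (pre ++ [x])
          rwa [hstep] at h2
      · have h2 := ih (pre ++ [x])
        rw [hstep] at h2
        simpa [pvCollect, h] using h2

theorem perm_collect_dups (flat : List Int) :
    (pvCollect [] flat).Perm
      ((PySem.List.dedup flat).filter (fun m => 2 ≤ flat.count m)) := by
  rw [List.perm_ext_iff_of_nodup (nodup_pvCollect _ _)
    (List.Nodup.filter _ (PySem.List.nodup_dedup flat))]
  intro m
  rw [mem_pvCollect]
  simp [PySem.List.mem_dedup, List.mem_filter]
  intro h
  rw [← List.count_pos_iff]
  omega

-- the dict of positions: lookups and items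
def pvPos (flat : List Int) : PySem.Dict Int (List Int) :=
  (PySem.List.enumerate flat 0).foldl
    (fun d p => d.modify p.2 [] (fun v => v ++ [p.1])) PySem.Dict.empty

theorem pvPos_getD (flat : List Int) (m : Int) :
    (pvPos flat).getD m [] = pvOcc flat m := by
  unfold pvPos pvOcc
  have hswap : ((PySem.List.enumerate flat 0).map (fun p => (p.2, p.1))).foldl
        (fun d q => d.modify q.1 [] (fun v => v ++ [q.2])) PySem.Dict.empty
      = (PySem.List.enumerate flat 0).foldl
        (fun d p => d.modify p.2 [] (fun v => v ++ [p.1])) PySem.Dict.empty := by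
    rw [List.foldl_map]
  rw [← hswap]
  rw [PySem.Dict.getD_foldl_modify_append, PySem.Dict.getD_empty]
  simp [List.filter_map, List.map_map, Function.comp_def]

theorem pvPos_keys (flat : List Int) :
    (pvPos flat).keys = PySem.List.dedup flat := by
  unfold pvPos
  rw [PySem.Dict.keys_foldl_modify_key]
  simp [PySem.List.map_snd_enumerate, PySem.Set.update, PySem.Set.ofList_eq_foldl]

theorem alt_eq (input_list : List (List Int × Int × Int × Int × Int)) :
    get_sandhi_mention_alt input_list
      = PySem.List.sorted
          ((PySem.List.dedup (input_list.flatMap (fun t => t.1))).filter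
            (fun m => 2 ≤ (input_list.flatMap (fun t => t.1)).count m))
          (fun m => pvKeyB (input_list.flatMap (fun t => t.1)) m) false := by
  unfold get_sandhi_mention_alt
  have hnodup : (pvPos (input_list.flatMap (fun t => t.1))).keys.Nodup := by
    rw [pvPos_keys]; exact PySem.List.nodup_dedup _
  have hitems := PySem.Dict.items_eq_map_keys (pvPos (input_list.flatMap (fun t => t.1))) hnodup []
  show PySem.List.sorted
      (((pvPos _).items.filter (fun q => 2 ≤ q.2.length)).map (fun q => q.1))
      (fun m => PySem.List.pyGetD ((pvPos _).getD m []) 1 0) false = _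
  rw [hitems, pvPos_keys]
  have hdups : (((PySem.List.dedup (input_list.flatMap (fun t => t.1))).map
        (fun k => (k, (pvPos (input_list.flatMap (fun t => t.1))).getD k []))).filter
          (fun q => 2 ≤ q.2.length)).map (fun q => q.1)
      = (PySem.List.dedup (input_list.flatMap (fun t => t.1))).filter
          (fun m => 2 ≤ (input_list.flatMap (fun t => t.1)).count m) := by
    have hlen : ∀ k : Int, ((pvPos (input_list.flatMap (fun t => t.1))).getD k []).length
        = (input_list.flatMap (fun t => t.1)).count k := by
      intro k; rw [pvPos_getD]; exact filter_enumerate_count _ _ _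
    simp [List.filter_map, List.map_map, Function.comp_def, hlen]
  rw [hdups]
  have hkey : (fun m => PySem.List.pyGetD
        ((pvPos (input_list.flatMap (fun t => t.1))).getD m []) 1 0)
      = (fun m => pvKeyB (input_list.flatMap (fun t => t.1)) m) := by
    funext m; rw [pvPos_getD]; rfl
  rw [hkey]

-- ===== VERDICT (by name: the statement is the Claim_ definition above) =====
theorem get_sandhi_mention_spec : Claim_equal_get_sandhi_mention := by
  intro input_list _
  unfold Spec_get_sandhi_mention get_sandhi_mention
  rw [alt_eq, pvFoldOuter_eq]
  rw [pvFoldA_eq _ [] [] (by simp)]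
  simp only [List.nil_append]
  exact (PySem.List.sorted_eq_of_perm_of_pairwise_lt _ _ _
    (perm_collect_dups _) (by simpa using pairwise_pvCollect _ [])).symm
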